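-- pv_equiv track=rewrite | github.com/SeungjipLee/Algorithm | 장현욱/2주차/(7)명예의전당.py | solution
-- ===== SOURCE A (Python) =====
-- def solution(k, score):
--     answer = []
--     result = []
--     for i in score:
--         if len(answer) < k:
--             answer.append(i)
--             answer.sort(reverse=True)
--             result.append(answer[-1])
--         else:
--             if i > answer[-1]:
--                 answer.sort(reverse=True)
--                 answer.pop()
--                 answer.append(i)
--                 answer.sort(reverse=True)
--                 result.append(answer[-1])
--             else:
--                 result.append(answer[-1])
--     return result
-- ===== SOURCE B (Python) =====
-- def solution(k, score):
--     # Day j's record is an order statistic of the prefix seen so far: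
--     # the k-th highest score, or the overall minimum while fewer than k
--     # scores have been seen.  No incremental hall-of-fame state is kept.
--     return [sorted(score[:j + 1])[max(0, j + 1 - k)] for j in range(len(score))]
-- ===== Notes on version B (the rewrite author's own statement) =====
-- stated objective: simpler
-- what changed: B drops A's incrementally maintained hall-of-fame buffer (appended/popped and re-sorted up to three times per day) entirely and computes each day's record directly as an order statistic of the prefix seen so far: sorted(score[:j+1])[max(0, j+1-k)].
import Mathlib
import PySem

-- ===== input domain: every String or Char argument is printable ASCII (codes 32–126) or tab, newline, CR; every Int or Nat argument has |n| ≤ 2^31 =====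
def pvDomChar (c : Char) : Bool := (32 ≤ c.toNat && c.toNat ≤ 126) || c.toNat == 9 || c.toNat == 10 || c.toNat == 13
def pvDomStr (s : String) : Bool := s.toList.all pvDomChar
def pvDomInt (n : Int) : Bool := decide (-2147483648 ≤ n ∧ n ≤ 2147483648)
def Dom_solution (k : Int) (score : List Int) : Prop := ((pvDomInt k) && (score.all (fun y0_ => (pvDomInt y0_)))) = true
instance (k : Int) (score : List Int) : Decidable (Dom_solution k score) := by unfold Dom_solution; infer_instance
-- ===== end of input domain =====

-- B drops A's incrementally maintained hall-of-fame buffer entirely and computes each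
-- day's record directly as an order statistic of the prefix seen so far (simpler, not faster).

-- ===== PORT A =====
-- answer.sort(reverse=True)
def sortDesc (xs : List Int) : List Int := PySem.List.sorted xs (fun x => x) true

-- A's for-loop over score, state = (answer, result); the intermediate lists of each branch
-- are written inline. answer[-1] via pyGetD is exact whenever answer ≠ [] (guaranteed under
-- Pre_; Python raises IndexError otherwise), answer.pop() = dropLast likewise.
def solutionGo (k : Int) (answer result score : List Int) : List Int :=
  match score with
  | [] => result
  | i :: rest =>
    if PySem.List.len answer < k then
      -- answer.append(i); answer.sort(reverse=True); result.append(answer[-1])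
      solutionGo k (sortDesc (answer ++ [i]))
        (result ++ [PySem.List.pyGetD (sortDesc (answer ++ [i])) (-1) 0]) rest
    else if i > PySem.List.pyGetD answer (-1) 0 then
      -- answer.sort(reverse=True); answer.pop(); answer.append(i); answer.sort(reverse=True)
      solutionGo k (sortDesc ((sortDesc answer).dropLast ++ [i]))
        (result ++ [PySem.List.pyGetD (sortDesc ((sortDesc answer).dropLast ++ [i])) (-1) 0]) rest
    else
      solutionGo k answer (result ++ [PySem.List.pyGetD answer (-1) 0]) rest

def solution (k : Int) (score : List Int) : List Int := solutionGo k [] [] score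

-- ===== PORT B =====
-- [sorted(score[:j+1])[max(0, j+1-k)] for j in range(len(score))]
-- sorted(..)[idx] via pyGetD is exact whenever the index is in range (guaranteed under Pre_;
-- Python raises IndexError otherwise).
def solution_alt (k : Int) (score : List Int) : List Int :=
  (PySem.List.pyRange 0 (PySem.List.len score) 1).map (fun j =>
    PySem.List.pyGetD
      (PySem.List.sorted (PySem.List.slice score none (some (j + 1))) (fun x => x) false)
      (max 0 (j + 1 - k)) 0)

-- ===== PRECONDITION & SPEC =====
-- Pre_ excludes only the inputs where BOTH Pythons raise IndexError: k < 1 with a nonempty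
-- score (A reads the minimum of an empty buffer, B indexes past the end of the prefix).
def Pre_solution (k : Int) (score : List Int) : Prop := score = [] ∨ 1 ≤ k
instance (k : Int) (score : List Int) : Decidable (Pre_solution k score) := by unfold Pre_solution; infer_instance
def pvWitness_solution : Int × List Int := (3, [10, 100, 20, 150, 1, 100, 200])

def Spec_solution (k : Int) (score : List Int) (out : List Int) : Prop := out = solution_alt k score
instance (k : Int) (score : List Int) (out : List Int) : Decidable (Spec_solution k score out) := by unfold Spec_solution; infer_instance

-- ===== CLAIM (what is proved, stated in full; the proofs are below) =====
def Claim_equal_solution : Prop := ∀ (k : Int) (score : List Int), Dom_solution k score → Pre_solution k score → Spec_solution k score (solution k score)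

-- ===== LEMMAS AND PROOFS =====

-- ascending insertion-sorted image of a list, built front to back (asc (p ++ [i]) steps by one orderedInsert)
def asc (q : List Int) : List Int := q.foldl (fun s a => List.orderedInsert (· ≤ ·) a s) []

lemma asc_append_singleton (p : List Int) (i : Int) :
    asc (p ++ [i]) = List.orderedInsert (· ≤ ·) i (asc p) := by
  simp [asc]

lemma asc_sorted (p : List Int) : (asc p).Pairwise (· ≤ ·) := by
  induction p using List.reverseRecOn with
  | nil => simp [asc]
  | append_singleton p i ih =>
    rw [asc_append_singleton]
    exact List.Pairwise.orderedInsert i (asc p) ih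

lemma asc_perm (p : List Int) : (asc p).Perm p := by
  induction p using List.reverseRecOn with
  | nil => simp [asc]
  | append_singleton p i ih =>
    rw [asc_append_singleton]
    exact ((List.perm_orderedInsert _ i (asc p)).trans (ih.cons i)).trans
      (List.perm_append_singleton i p).symm

lemma length_asc (p : List Int) : (asc p).length = p.length := (asc_perm p).length_eq

-- uniqueness of the descending sort: sortDesc xs is the reverse of any ascending-sorted permutation
lemma sortDesc_eq_reverse {xs t : List Int} (hp : t.Perm xs) (hs : t.Pairwise (· ≤ ·)) :
    sortDesc xs = t.reverse := by
  refine ((PySem.List.sorted_perm xs (fun x => x) true).trans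
      (hp.symm.trans t.reverse_perm.symm)).eq_of_pairwise
    (fun a b _ _ h1 h2 => le_antisymm h2 h1)
    (PySem.List.sorted_pairwise_rev xs (fun x => x)) ?_
  rw [List.pairwise_reverse]; exact hs

-- a list that is already descending is unchanged by sort(reverse=True)
lemma sortDesc_of_desc {xs : List Int} (h : xs.Pairwise (fun a b => b ≤ a)) :
    sortDesc xs = xs := PySem.List.sorted_rev_eq_self_of_pairwise xs (fun x => x) h

-- inserting i below position d of a sorted list leaves the suffix from d unchanged (one index later)
lemma drop_orderedInsert_le :
    ∀ (s : List Int) (d : Nat) (i : Int), s.Pairwise (· ≤ ·) → (hd : d < s.length) →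
      i ≤ s[d] → (List.orderedInsert (· ≤ ·) i s).drop (d + 1) = s.drop d := by
  intro s
  induction s with
  | nil => intro d i _ hd; simp at hd
  | cons y t ih =>
    intro d i hs hd hle
    rw [List.orderedInsert]
    split
    · rfl
    · rename_i hni
      cases d with
      | zero => simp at hle; omega
      | succ d =>
        have := ih d i (List.pairwise_cons.mp hs).2 (by simpa using hd) (by simpa using hle)
        simpa using this

-- inserting i above position d of a sorted list commutes with dropping d+1 elements
lemma drop_orderedInsert_gt :
    ∀ (s : List Int) (d : Nat) (i : Int), s.Pairwise (· ≤ ·) → (hd : d < s.length) →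
      s[d] < i → (List.orderedInsert (· ≤ ·) i s).drop (d + 1)
        = List.orderedInsert (· ≤ ·) i (s.drop (d + 1)) := by
  intro s
  induction s with
  | nil => intro d i _ hd; simp at hd
  | cons y t ih =>
    intro d i hs hd hgt
    have hyd : y ≤ (y :: t)[d] := by
      cases d with
      | zero => simp
      | succ d =>
        simpa using (List.pairwise_cons.mp hs).1 _ (List.getElem_mem (by simpa using hd))
    rw [List.orderedInsert]
    split
    · rename_i hi; exfalso; exact absurd (le_trans hyd (le_of_lt hgt)) (by omega)
    · cases d with
      | zero => rfl
      | succ d =>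
        have := ih d i (List.pairwise_cons.mp hs).2 (by simpa using hd) (by simpa using hgt)
        simpa using this

-- reading a sorted list at position n = the head of its dropped suffix
lemma getD_of_drop (l : List Int) (n : Nat) (c : Int) (t : List Int)
    (h : l.drop n = c :: t) : l.getD n 0 = c := by
  have h2 : l[n]? = some c := by rw [← List.head?_drop, h]; rfl
  rw [List.getD_eq_getElem?_getD, h2]; rfl

-- one day of A's loop, in terms of the invariant state (answer = reverse of the
-- top-k suffix of asc(prefix)): the state steps to the next prefix and the emitted
-- value is asc(prefix')[|prefix'| - k]
lemma stepA (k : Int) (hk : 1 ≤ k) (p : List Int) (i : Int) (result rest' : List Int) :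
    solutionGo k (((asc p).drop (p.length - k.toNat)).reverse) result (i :: rest')
      = solutionGo k (((asc (p ++ [i])).drop (p.length + 1 - k.toNat)).reverse)
          (result ++ [(asc (p ++ [i])).getD (p.length + 1 - k.toNat) 0]) rest' := by
  have hK1 : 1 ≤ k.toNat := by omega
  have hkK : (k.toNat : Int) = k := Int.toNat_of_nonneg (by omega)
  have hlen : (asc p).length = p.length := length_asc p
  have hlen' : (asc (p ++ [i])).length = p.length + 1 := by
    rw [length_asc]; simp
  have hlenans : PySem.List.len (((asc p).drop (p.length - k.toNat)).reverse)
      = ((p.length - (p.length - k.toNat) : Nat) : Int) := by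
    rw [PySem.List.len_eq]; simp [hlen]
  rw [solutionGo]
  by_cases hmK : p.length < k.toNat
  · -- fewer than k scores seen: append-and-sort branch
    have hd0 : p.length - k.toNat = 0 := by omega
    have hcond : PySem.List.len (((asc p).drop (p.length - k.toNat)).reverse) < k := by
      rw [hlenans]; omega
    rw [if_pos hcond, hd0, List.drop_zero]
    have hins : sortDesc ((asc p).reverse ++ [i]) = (asc (p ++ [i])).reverse := by
      rw [asc_append_singleton]
      refine sortDesc_eq_reverse ?_ (List.Pairwise.orderedInsert i (asc p) (asc_sorted p))
      exact (List.perm_orderedInsert _ i (asc p)).trans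
        (((asc p).reverse_perm.symm.cons i).trans
          (List.perm_append_singleton i (asc p).reverse).symm)
    obtain ⟨c, t, hct⟩ : ∃ c t, asc (p ++ [i]) = c :: t := by
      cases h : asc (p ++ [i]) with
      | nil => exfalso; rw [h] at hlen'; simp at hlen'
      | cons c t => exact ⟨c, t, rfl⟩
    have hd1 : p.length + 1 - k.toNat = 0 := by omega
    rw [hins, hd1, List.drop_zero, hct, List.reverse_cons,
        PySem.List.pyGetD_neg_one_append_singleton]
    simp
  · -- k scores already kept: answer = reverse of (c :: t), c the current k-th highest
    have hd : p.length - k.toNat < (asc p).length := by rw [hlen]; omega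
    obtain ⟨c, t, hct⟩ : ∃ c t, (asc p).drop (p.length - k.toNat) = c :: t := by
      cases h : (asc p).drop (p.length - k.toNat) with
      | nil => exfalso; have := List.drop_eq_nil_iff.mp h; omega
      | cons c t => exact ⟨c, t, rfl⟩
    have hcond : ¬ PySem.List.len (((asc p).drop (p.length - k.toNat)).reverse) < k := by
      rw [hlenans]; omega
    rw [if_neg hcond, hct, List.reverse_cons, PySem.List.pyGetD_neg_one_append_singleton]
    have hc : (asc p)[p.length - k.toNat]'hd = c := by
      have h2 : ((asc p).drop (p.length - k.toNat)).head? = (asc p)[p.length - k.toNat]? :=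
        List.head?_drop
      rw [hct] at h2
      simpa [List.getElem?_eq_getElem hd] using h2.symm
    have hsorted_ct : (c :: t).Pairwise (· ≤ ·) := by
      rw [← hct]; exact (asc_sorted p).drop
    have ht : t = (asc p).drop (p.length - k.toNat + 1) := by
      rw [← List.drop_drop, hct]; rfl
    have hd1 : p.length + 1 - k.toNat = p.length - k.toNat + 1 := by omega
    by_cases hgt : i > c
    · -- replace the minimum: sort, pop, append, sort
      rw [if_pos hgt]
      have hdesc : sortDesc (t.reverse ++ [c]) = t.reverse ++ [c] := by
        apply sortDesc_of_desc
        rw [← List.reverse_cons, List.pairwise_reverse]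
        exact hsorted_ct
      have hins : sortDesc (t.reverse ++ [i]) = (List.orderedInsert (· ≤ ·) i t).reverse := by
        refine sortDesc_eq_reverse ?_
          (List.Pairwise.orderedInsert i t (List.pairwise_cons.mp hsorted_ct).2)
        exact (List.perm_orderedInsert _ i t).trans
          ((t.reverse_perm.symm.cons i).trans (List.perm_append_singleton i t.reverse).symm)
      have hkey : List.orderedInsert (· ≤ ·) i t
          = (asc (p ++ [i])).drop (p.length + 1 - k.toNat) := by
        rw [ht, asc_append_singleton, hd1]
        exact (drop_orderedInsert_gt (asc p) (p.length - k.toNat) i (asc_sorted p) hd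
          (by rw [hc]; omega)).symm
      obtain ⟨c', t', hct'⟩ : ∃ c' t',
          (asc (p ++ [i])).drop (p.length + 1 - k.toNat) = c' :: t' := by
        cases h : (asc (p ++ [i])).drop (p.length + 1 - k.toNat) with
        | nil => exfalso; have := List.drop_eq_nil_iff.mp h; omega
        | cons c' t' => exact ⟨c', t', rfl⟩
      rw [hdesc, List.dropLast_concat, hins, hkey, hct', List.reverse_cons,
          PySem.List.pyGetD_neg_one_append_singleton,
          getD_of_drop _ _ _ _ hct']
    · -- new score does not beat the k-th highest: nothing changes
      rw [if_neg hgt]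
      have hkey : (asc (p ++ [i])).drop (p.length + 1 - k.toNat)
          = (asc p).drop (p.length - k.toNat) := by
        rw [asc_append_singleton, hd1]
        exact drop_orderedInsert_le (asc p) (p.length - k.toNat) i (asc_sorted p) hd
          (by rw [hc]; omega)
      rw [hkey, hct, List.reverse_cons, getD_of_drop _ _ _ _ (hkey.trans hct)]

-- A's loop invariant: the answer buffer is the reverse of the top-k suffix of asc(prefix)
lemma goA (k : Int) (hk : 1 ≤ k) :
    ∀ (rest p result : List Int),
      solutionGo k (((asc p).drop (p.length - k.toNat)).reverse) result rest
        = result ++ (List.range rest.length).map (fun j =>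
            (asc (p ++ rest.take (j + 1))).getD (p.length + (j + 1) - k.toNat) 0) := by
  intro rest
  induction rest with
  | nil => intro p result; simp [solutionGo]
  | cons i rest' ih =>
    intro p result
    rw [stepA k hk p i result rest']
    have h2 := ih (p ++ [i]) (result ++ [(asc (p ++ [i])).getD (p.length + 1 - k.toNat) 0])
    rw [show (p ++ [i]).length = p.length + 1 by simp] at h2
    rw [h2]
    have hmap : (List.range (i :: rest').length).map (fun j =>
          (asc (p ++ (i :: rest').take (j + 1))).getD (p.length + (j + 1) - k.toNat) 0)
        = (asc (p ++ [i])).getD (p.length + 1 - k.toNat) 0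
          :: (List.range rest'.length).map (fun j =>
              (asc (p ++ [i] ++ rest'.take (j + 1))).getD (p.length + 1 + (j + 1) - k.toNat) 0) := by
      rw [List.length_cons, List.range_succ_eq_map, List.map_cons, List.map_map]
      refine congrArg₂ List.cons (by simp) (List.map_congr_left (fun a _ => ?_))
      have harith : p.length + (a + 1 + 1) - k.toNat = p.length + 1 + (a + 1) - k.toNat := by
        omega
      simp only [Function.comp_apply, Nat.succ_eq_add_one, List.take_succ_cons,
        List.append_assoc, List.cons_append, List.nil_append, harith]
    rw [hmap]; simp

lemma solution_eq (k : Int) (hk : 1 ≤ k) (score : List Int) :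
    solution k score = (List.range score.length).map (fun j =>
      (asc (score.take (j + 1))).getD ((j + 1) - k.toNat) 0) := by
  have := goA k hk score [] []
  simpa [solution] using this

lemma solution_alt_eq (k : Int) (hk : 1 ≤ k) (score : List Int) :
    solution_alt k score = (List.range score.length).map (fun j =>
      (asc (score.take (j + 1))).getD ((j + 1) - k.toNat) 0) := by
  unfold solution_alt
  rw [PySem.List.len_eq, PySem.List.pyRange_zero_natCast, List.map_map]
  refine List.map_congr_left (fun j _ => ?_)
  simp only [Function.comp_apply]
  have h1 : ((j : Int) + 1) = ((j + 1 : Nat) : Int) := by push_cast; ring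
  rw [h1, PySem.List.slice_to_natCast,
      PySem.List.sorted_id_eq_of_perm_of_pairwise _ _ (asc_perm _) (asc_sorted _)]
  have h2 : max 0 (((j + 1 : Nat) : Int) - k) = (((j + 1) - k.toNat : Nat) : Int) := by omega
  rw [h2, PySem.List.pyGetD_natCast]

-- ===== VERDICT (by name: the statement is the Claim_ definition above) =====
theorem solution_spec : Claim_equal_solution := by
  intro k score _ hpre
  unfold Spec_solution
  rcases hpre with rfl | hk
  · rfl
  · rw [solution_eq k hk score, solution_alt_eq k hk score]
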